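-- pv_equiv track=rewrite | github.com/caioavidago1/gabriel-de-memorandos | tipo_memorando/_base/fatos/utils.py | _detect_fact_type
-- ===== SOURCE A (Python) =====
-- def _detect_fact_type(field: str) -> str:
--     """Detecta tipo do fact baseado no nome do campo."""
--     field_lower = field.lower()
--     if "moeda" in field_lower or "currency" in field_lower:
--         return "currency"
--     if any(x in field_lower for x in ["date", "ano", "year", "periodo", "period"]):
--         return "date"
--     if any(x in field_lower for x in ["nome", "name", "identificador", "vintage"]):
--         return "name"
--     if any(x in field_lower for x in ["mm", "pct", "percent", "multiple", "ratio", "irr", "moic", "target", "cap", "ticket", "revenue", "ebitda", "debt", "equity", "cash", "earnout", "seller_note"]):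
--         return "numeric"
--     if "commentary" in field_lower or "comentario" in field_lower:
--         return "comment"
--     return "text"
-- ===== SOURCE B (Python) =====
-- _TYPES = ["currency", "date", "name", "numeric", "comment", "text"]
--
-- _PRIORITY = {
--     "moeda": 0, "currency": 0,
--     "date": 1, "ano": 1, "year": 1, "periodo": 1, "period": 1,
--     "nome": 2, "name": 2, "identificador": 2, "vintage": 2,
--     "mm": 3, "pct": 3, "percent": 3, "multiple": 3, "ratio": 3, "irr": 3,
--     "moic": 3, "target": 3, "cap": 3, "ticket": 3, "revenue": 3,
--     "ebitda": 3, "debt": 3, "equity": 3, "cash": 3, "earnout": 3,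
--     "seller_note": 3,
--     "commentary": 4, "comentario": 4,
-- }
--
--
-- def _detect_fact_type(field: str) -> str:
--     """Detecta tipo do fact baseado no nome do campo."""
--     fl = field.lower()
--     best = min((p for k, p in _PRIORITY.items() if k in fl), default=5)
--     return _TYPES[best]
-- ===== Notes on version B (the rewrite author's own statement) =====
-- stated objective: alternative
-- what changed: Replaced the first-match branch cascade by an aggregation: a keyword-to-priority map is scanned once, the priorities of ALL matching keywords are collected, and the answer is the type table indexed by their minimum (default 'text').
import Mathlib
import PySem

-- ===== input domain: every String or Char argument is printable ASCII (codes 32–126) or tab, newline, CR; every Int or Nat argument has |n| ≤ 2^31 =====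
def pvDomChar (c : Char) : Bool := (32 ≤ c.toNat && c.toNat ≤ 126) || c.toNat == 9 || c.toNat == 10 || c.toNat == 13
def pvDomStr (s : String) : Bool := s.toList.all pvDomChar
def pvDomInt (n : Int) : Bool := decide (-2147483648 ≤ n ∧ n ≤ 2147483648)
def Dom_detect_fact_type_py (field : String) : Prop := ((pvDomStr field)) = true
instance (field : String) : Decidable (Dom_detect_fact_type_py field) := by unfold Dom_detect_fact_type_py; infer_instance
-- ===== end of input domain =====

-- ===== PORT A =====
-- B replaces A's first-match branch cascade by an aggregation: it collects the
-- priorities of ALL matching keywords and indexes the type table by their minimum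
-- (objective: alternative decomposition, same cost).

-- port of A: the literal if-chain over the lowered field
def detect_fact_type_py (field : String) : String :=
  let field_lower := PySem.Str.lower field
  if PySem.Str.isIn "moeda" field_lower || PySem.Str.isIn "currency" field_lower then "currency"
  else if ["date", "ano", "year", "periodo", "period"].any (fun x => PySem.Str.isIn x field_lower) then "date"
  else if ["nome", "name", "identificador", "vintage"].any (fun x => PySem.Str.isIn x field_lower) then "name"
  else if ["mm", "pct", "percent", "multiple", "ratio", "irr", "moic", "target", "cap", "ticket", "revenue", "ebitda", "debt", "equity", "cash", "earnout", "seller_note"].any (fun x => PySem.Str.isIn x field_lower) then "numeric"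
  else if PySem.Str.isIn "commentary" field_lower || PySem.Str.isIn "comentario" field_lower then "comment"
  else "text"

-- ===== PORT B =====
-- the _TYPES table of Source B
def pvTypes : List String := ["currency", "date", "name", "numeric", "comment", "text"]

-- the _PRIORITY keyword → priority dict of Source B (insertion order)
def pvPriority : List (String × Nat) :=
  [ ("moeda", 0), ("currency", 0),
    ("date", 1), ("ano", 1), ("year", 1), ("periodo", 1), ("period", 1),
    ("nome", 2), ("name", 2), ("identificador", 2), ("vintage", 2),
    ("mm", 3), ("pct", 3), ("percent", 3), ("multiple", 3), ("ratio", 3), ("irr", 3),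
    ("moic", 3), ("target", 3), ("cap", 3), ("ticket", 3), ("revenue", 3),
    ("ebitda", 3), ("debt", 3), ("equity", 3), ("cash", 3), ("earnout", 3),
    ("seller_note", 3),
    ("commentary", 4), ("comentario", 4) ]

-- the generator '(p for k, p in _PRIORITY.items() if k in fl)' of Source B
def pvMatched (fl : String) : List Nat :=
  (pvPriority.filter (fun kp => PySem.Str.isIn kp.1 fl)).map Prod.snd

-- Source B: best = min(matching priorities, default=5); return _TYPES[best]
def detect_fact_type_py_alt (field : String) : String :=
  let fl := PySem.Str.lower field
  let best : Nat :=
    match PySem.List.min? (pvMatched fl) (fun x => x) with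
    | none => 5
    | some m => m
  pvTypes.getD best ""

-- ===== PRECONDITION & SPEC =====
def Spec_detect_fact_type_py (field : String) (out : String) : Prop := out = detect_fact_type_py_alt field
instance (field : String) (out : String) : Decidable (Spec_detect_fact_type_py field out) := by unfold Spec_detect_fact_type_py; infer_instance

-- ===== CLAIM =====
def Claim_equal_detect_fact_type_py : Prop := ∀ (field : String), Dom_detect_fact_type_py field → Spec_detect_fact_type_py field (detect_fact_type_py field)

-- ===== LEMMAS AND PROOFS =====

-- membership in the matched-priority list, spelled out
theorem pv_mem_matched (fl : String) (y : Nat) :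
    y ∈ pvMatched fl ↔ ∃ k, (k, y) ∈ pvPriority ∧ PySem.Str.isIn k fl = true := by
  constructor
  · intro hy
    simp only [pvMatched, List.mem_map, List.mem_filter] at hy
    rcases hy with ⟨⟨k, p⟩, ⟨hm, hin⟩, rfl⟩
    exact ⟨k, hm, hin⟩
  · rintro ⟨k, hm, hin⟩
    simp only [pvMatched, List.mem_map, List.mem_filter]
    exact ⟨⟨k, y⟩, ⟨hm, hin⟩, rfl⟩

-- the min-with-default equals p when p is a matching priority and a lower bound
theorem pv_best_eq (fl : String) (p : Nat)
    (hmem : p ∈ pvMatched fl) (hlb : ∀ y ∈ pvMatched fl, p ≤ y) :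
    (match PySem.List.min? (pvMatched fl) (fun x => x) with
      | none => 5
      | some m => m) = p := by
  rcases h : PySem.List.min? (pvMatched fl) (fun x => x) with _ | m
  · rw [PySem.List.min?_eq_none_iff] at h
    rw [h] at hmem; simp at hmem
  · have h1 : m ∈ pvMatched fl := PySem.List.min?_mem h
    have h2 := PySem.List.min?_isMin h p hmem
    have h3 := hlb m h1
    show m = p
    omega

set_option maxHeartbeats 1000000 in
theorem detect_fact_type_py_spec : Claim_equal_detect_fact_type_py := by
  intro field _
  unfold Spec_detect_fact_type_py detect_fact_type_py detect_fact_type_py_alt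
  set fl := PySem.Str.lower field with hfl
  dsimp only
  split_ifs with h1 h2 h3 h4 h5
  · -- currency
    simp only [Bool.or_eq_true] at h1
    have hlb : ∀ y ∈ pvMatched fl, 0 ≤ y := by
      intro y hy
      rw [pv_mem_matched] at hy
      obtain ⟨k, hk, hkin⟩ := hy
      simp only [pvPriority, List.mem_cons, List.not_mem_nil, or_false, Prod.mk.injEq] at hk
      rcases hk with (⟨rfl, rfl⟩|⟨rfl, rfl⟩|⟨rfl, rfl⟩|⟨rfl, rfl⟩|⟨rfl, rfl⟩|⟨rfl, rfl⟩|⟨rfl, rfl⟩|⟨rfl, rfl⟩|⟨rfl, rfl⟩|⟨rfl, rfl⟩|⟨rfl, rfl⟩|⟨rfl, rfl⟩|⟨rfl, rfl⟩|⟨rfl, rfl⟩|⟨rfl, rfl⟩|⟨rfl, rfl⟩|⟨rfl, rfl⟩|⟨rfl, rfl⟩|⟨rfl, rfl⟩|⟨rfl, rfl⟩|⟨rfl, rfl⟩|⟨rfl, rfl⟩|⟨rfl, rfl⟩|⟨rfl, rfl⟩|⟨rfl, rfl⟩|⟨rfl, rfl⟩|⟨rfl, rfl⟩|⟨rfl,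 rfl⟩|⟨rfl, rfl⟩|⟨rfl, rfl⟩) <;> omega
    rcases h1 with hin | hin <;> (rw [pv_best_eq fl 0 ((pv_mem_matched fl 0).mpr ⟨_, by simp [pvPriority], hin⟩) hlb]; rfl)
  · -- date
    simp only [Bool.or_eq_true, Bool.not_eq_true, not_or] at h1
    simp only [List.any_eq_true, List.mem_cons, List.not_mem_nil, or_false] at h2
    have hlb : ∀ y ∈ pvMatched fl, 1 ≤ y := by
      intro y hy
      rw [pv_mem_matched] at hy
      obtain ⟨k, hk, hkin⟩ := hy
      simp only [pvPriority, List.mem_cons, List.not_mem_nil, or_false, Prod.mk.injEq] at hk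
      rcases hk with (⟨rfl, rfl⟩|⟨rfl, rfl⟩|⟨rfl, rfl⟩|⟨rfl, rfl⟩|⟨rfl, rfl⟩|⟨rfl, rfl⟩|⟨rfl, rfl⟩|⟨rfl, rfl⟩|⟨rfl, rfl⟩|⟨rfl, rfl⟩|⟨rfl, rfl⟩|⟨rfl, rfl⟩|⟨rfl, rfl⟩|⟨rfl, rfl⟩|⟨rfl, rfl⟩|⟨rfl, rfl⟩|⟨rfl, rfl⟩|⟨rfl, rfl⟩|⟨rfl, rfl⟩|⟨rfl, rfl⟩|⟨rfl, rfl⟩|⟨rfl, rfl⟩|⟨rfl, rfl⟩|⟨rfl, rfl⟩|⟨rfl, rfl⟩|⟨rfl, rfl⟩|⟨rfl, rfl⟩|⟨rfl, rfl⟩|⟨rfl, rfl⟩|⟨rfl, rfl⟩) <;> first | omega | simp_all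
    obtain ⟨x, hx, hin⟩ := h2
    rcases hx with rfl | rfl | rfl | rfl | rfl <;> (rw [pv_best_eq fl 1 ((pv_mem_matched fl 1).mpr ⟨_, by simp [pvPriority], hin⟩) hlb]; rfl)
  · -- name
    simp only [Bool.or_eq_true, Bool.not_eq_true, not_or] at h1
    simp only [List.any_eq_true, List.mem_cons, List.not_mem_nil, or_false, not_exists, not_and,
      Bool.not_eq_true] at h2 h3
    have hlb : ∀ y ∈ pvMatched fl, 2 ≤ y := by
      intro y hy
      rw [pv_mem_matched] at hy
      obtain ⟨k, hk, hkin⟩ := hy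
      simp only [pvPriority, List.mem_cons, List.not_mem_nil, or_false, Prod.mk.injEq] at hk
      rcases hk with (⟨rfl, rfl⟩|⟨rfl, rfl⟩|⟨rfl, rfl⟩|⟨rfl, rfl⟩|⟨rfl, rfl⟩|⟨rfl, rfl⟩|⟨rfl, rfl⟩|⟨rfl, rfl⟩|⟨rfl, rfl⟩|⟨rfl, rfl⟩|⟨rfl, rfl⟩|⟨rfl, rfl⟩|⟨rfl, rfl⟩|⟨rfl, rfl⟩|⟨rfl, rfl⟩|⟨rfl, rfl⟩|⟨rfl, rfl⟩|⟨rfl, rfl⟩|⟨rfl, rfl⟩|⟨rfl, rfl⟩|⟨rfl, rfl⟩|⟨rfl, rfl⟩|⟨rfl, rfl⟩|⟨rfl, rfl⟩|⟨rfl, rfl⟩|⟨rfl, rfl⟩|⟨rfl, rfl⟩|⟨rfl, rfl⟩|⟨rfl, rfl⟩|⟨rfl, rfl⟩) <;> first | omega | simp_all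
    obtain ⟨x, hx, hin⟩ := h3
    rcases hx with rfl | rfl | rfl | rfl <;> (rw [pv_best_eq fl 2 ((pv_mem_matched fl 2).mpr ⟨_, by simp [pvPriority], hin⟩) hlb]; rfl)
  · -- numeric
    simp only [Bool.or_eq_true, Bool.not_eq_true, not_or] at h1
    simp only [List.any_eq_true, List.mem_cons, List.not_mem_nil, or_false, not_exists, not_and,
      Bool.not_eq_true] at h2 h3 h4
    have hlb : ∀ y ∈ pvMatched fl, 3 ≤ y := by
      intro y hy
      rw [pv_mem_matched] at hy
      obtain ⟨k, hk, hkin⟩ := hy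
      simp only [pvPriority, List.mem_cons, List.not_mem_nil, or_false, Prod.mk.injEq] at hk
      rcases hk with (⟨rfl, rfl⟩|⟨rfl, rfl⟩|⟨rfl, rfl⟩|⟨rfl, rfl⟩|⟨rfl, rfl⟩|⟨rfl, rfl⟩|⟨rfl, rfl⟩|⟨rfl, rfl⟩|⟨rfl, rfl⟩|⟨rfl, rfl⟩|⟨rfl, rfl⟩|⟨rfl, rfl⟩|⟨rfl, rfl⟩|⟨rfl, rfl⟩|⟨rfl, rfl⟩|⟨rfl, rfl⟩|⟨rfl, rfl⟩|⟨rfl, rfl⟩|⟨rfl, rfl⟩|⟨rfl, rfl⟩|⟨rfl, rfl⟩|⟨rfl, rfl⟩|⟨rfl, rfl⟩|⟨rfl, rfl⟩|⟨rfl, rfl⟩|⟨rfl, rfl⟩|⟨rfl, rfl⟩|⟨rfl, rfl⟩|⟨rfl, rfl⟩|⟨rfl, rfl⟩) <;> first | omega | simp_all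
    obtain ⟨x, hx, hin⟩ := h4
    rcases hx with rfl | rfl | rfl | rfl | rfl | rfl | rfl | rfl | rfl | rfl | rfl | rfl | rfl | rfl | rfl | rfl | rfl <;> (rw [pv_best_eq fl 3 ((pv_mem_matched fl 3).mpr ⟨_, by simp [pvPriority], hin⟩) hlb]; rfl)
  · -- comment
    simp only [Bool.or_eq_true, Bool.not_eq_true, not_or] at h1 h5
    simp only [List.any_eq_true, List.mem_cons, List.not_mem_nil, or_false, not_exists, not_and,
      Bool.not_eq_true] at h2 h3 h4
    have hlb : ∀ y ∈ pvMatched fl, 4 ≤ y := by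
      intro y hy
      rw [pv_mem_matched] at hy
      obtain ⟨k, hk, hkin⟩ := hy
      simp only [pvPriority, List.mem_cons, List.not_mem_nil, or_false, Prod.mk.injEq] at hk
      rcases hk with (⟨rfl, rfl⟩|⟨rfl, rfl⟩|⟨rfl, rfl⟩|⟨rfl, rfl⟩|⟨rfl, rfl⟩|⟨rfl, rfl⟩|⟨rfl, rfl⟩|⟨rfl, rfl⟩|⟨rfl, rfl⟩|⟨rfl, rfl⟩|⟨rfl, rfl⟩|⟨rfl, rfl⟩|⟨rfl, rfl⟩|⟨rfl, rfl⟩|⟨rfl, rfl⟩|⟨rfl, rfl⟩|⟨rfl, rfl⟩|⟨rfl, rfl⟩|⟨rfl, rfl⟩|⟨rfl, rfl⟩|⟨rfl, rfl⟩|⟨rfl, rfl⟩|⟨rfl, rfl⟩|⟨rfl, rfl⟩|⟨rfl, rfl⟩|⟨rfl, rfl⟩|⟨rfl, rfl⟩|⟨rfl, rfl⟩|⟨rfl, rfl⟩|⟨rfl, rfl⟩) <;> first | omega | simp_all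
    rcases h5 with hin | hin
    · rw [pv_best_eq fl 4 ((pv_mem_matched fl 4).mpr ⟨"commentary", by simp [pvPriority], hin⟩) hlb]
      rfl
    · rw [pv_best_eq fl 4 ((pv_mem_matched fl 4).mpr ⟨"comentario", by simp [pvPriority], hin⟩) hlb]
      rfl
  · -- text
    simp only [Bool.or_eq_true, Bool.not_eq_true, not_or] at h1 h5
    simp only [List.any_eq_true, List.mem_cons, List.not_mem_nil, or_false, not_exists, not_and,
      Bool.not_eq_true] at h2 h3 h4
    have hm : pvMatched fl = [] := by
      rw [List.eq_nil_iff_forall_not_mem]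
      intro y hy
      rw [pv_mem_matched] at hy
      obtain ⟨k, hk, hkin⟩ := hy
      simp only [pvPriority, List.mem_cons, List.not_mem_nil, or_false, Prod.mk.injEq] at hk
      rcases hk with (⟨rfl, rfl⟩|⟨rfl, rfl⟩|⟨rfl, rfl⟩|⟨rfl, rfl⟩|⟨rfl, rfl⟩|⟨rfl, rfl⟩|⟨rfl, rfl⟩|⟨rfl, rfl⟩|⟨rfl, rfl⟩|⟨rfl, rfl⟩|⟨rfl, rfl⟩|⟨rfl, rfl⟩|⟨rfl, rfl⟩|⟨rfl, rfl⟩|⟨rfl, rfl⟩|⟨rfl, rfl⟩|⟨rfl, rfl⟩|⟨rfl, rfl⟩|⟨rfl, rfl⟩|⟨rfl, rfl⟩|⟨rfl, rfl⟩|⟨rfl, rfl⟩|⟨rfl, rfl⟩|⟨rfl, rfl⟩|⟨rfl, rfl⟩|⟨rfl, rfl⟩|⟨rfl, rfl⟩|⟨rfl, rfl⟩|⟨rfl, rfl⟩|⟨rfl, rfl⟩) <;> simp_all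
    rw [hm]
    rfl
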